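-- pv_equiv track=rewrite | github.com/krasilovalex/TeachAI | app.py | get_user_league
-- ===== SOURCE A (Python) =====
-- def get_user_league(level: int):
--     leagues = [
--         {"name": "Искатели Искры", "emoji": "🔥", "color": "#a58c6f", "min": 1, "max": 4},
--         {"name": "Подмастерья Промптов", "emoji": "🧱", "color": "#bb7e5d", "min": 5, "max": 9},
--         {"name": "Архитекторы Разума", "emoji": "⚙️", "color": "#6b7b8c", "min": 10, "max": 19},
--         {"name": "Владыки Моделей", "emoji": "🧠", "color": "#a9a9a9", "min": 20, "max": 34},
--         {"name": "Создатели Сознаний", "emoji": "🔥", "color": "#f4c542", "min": 35, "max": 49},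
--         {"name": "Легенды ИИ", "emoji": "💎", "color": "#4ecdc4", "min": 50, "max": 64},
--         {"name": "Сингулярности", "emoji": "🌀", "color": "#9c27b0", "min": 65, "max": 75}
--     ]
--
--     for league in leagues:
--         if league["min"] <= level <= league["max"]:
--             return {
--                 "name": league["name"],
--                 "emoji": league["emoji"],
--                 "color": league["color"]
--             }
--
--     return {
--         "league_name": "Неизвестная Лига",
--         "emoji": "❓",
--         "color": "#cccccc"
--     }
-- ===== SOURCE B (Python) =====
-- def get_user_league(level: int):
--     bounds = [4, 9, 19, 34, 49, 64, 75]
--     data = [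
--         ("Искатели Искры", "🔥", "#a58c6f"),
--         ("Подмастерья Промптов", "🧱", "#bb7e5d"),
--         ("Архитекторы Разума", "⚙️", "#6b7b8c"),
--         ("Владыки Моделей", "🧠", "#a9a9a9"),
--         ("Создатели Сознаний", "🔥", "#f4c542"),
--         ("Легенды ИИ", "💎", "#4ecdc4"),
--         ("Сингулярности", "🌀", "#9c27b0"),
--     ]
--     # bisect_left over the sorted upper bounds
--     lo, hi = 0, len(bounds)
--     while lo < hi:
--         mid = (lo + hi) // 2
--         if bounds[mid] < level:
--             lo = mid + 1
--         else:
--             hi = mid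
--     if level < 1 or lo >= len(bounds):
--         return {"league_name": "Неизвестная Лига", "emoji": "❓", "color": "#cccccc"}
--     name, emoji, color = data[lo]
--     return {"name": name, "emoji": emoji, "color": color}
-- ===== Notes on version B (the rewrite author's own statement) =====
-- stated objective: alternative
-- what changed: Replaces the linear scan over league range dicts by a binary search (bisect_left) over a parallel sorted list of upper bounds, then projects the selected league tuple; out-of-range levels (<1 or >75) fall through to the unknown-league dict.
import Mathlib
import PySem

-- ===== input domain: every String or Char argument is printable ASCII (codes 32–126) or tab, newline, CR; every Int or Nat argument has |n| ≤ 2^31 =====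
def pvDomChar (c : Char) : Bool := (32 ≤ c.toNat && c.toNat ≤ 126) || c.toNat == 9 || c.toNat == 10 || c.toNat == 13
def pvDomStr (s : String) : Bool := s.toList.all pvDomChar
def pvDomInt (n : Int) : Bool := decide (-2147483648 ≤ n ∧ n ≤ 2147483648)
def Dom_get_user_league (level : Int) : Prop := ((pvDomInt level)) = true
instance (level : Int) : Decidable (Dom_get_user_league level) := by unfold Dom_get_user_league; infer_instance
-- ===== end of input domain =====

-- B replaces A's linear scan over league ranges by a binary search (bisect_left) on the sorted upper bounds; alternative structure, not claimed faster.

-- ===== PORT A =====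
-- A's literal league table: (name, emoji, color, min, max)
def pvLeaguesA : List (String × String × String × Int × Int) :=
  [ ("Искатели Искры", "🔥", "#a58c6f", 1, 4),
    ("Подмастерья Промптов", "🧱", "#bb7e5d", 5, 9),
    ("Архитекторы Разума", "⚙️", "#6b7b8c", 10, 19),
    ("Владыки Моделей", "🧠", "#a9a9a9", 20, 34),
    ("Создатели Сознаний", "🔥", "#f4c542", 35, 49),
    ("Легенды ИИ", "💎", "#4ecdc4", 50, 64),
    ("Сингулярности", "🌀", "#9c27b0", 65, 75) ]

-- the for-loop with early return, as structural recursion over the list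
def pvFindLeagueA : List (String × String × String × Int × Int) → Int → List (String × String)
  | [], _ => [("league_name", "Неизвестная Лига"), ("emoji", "❓"), ("color", "#cccccc")]
  | (n, e, c, mn, mx) :: rest, level =>
      if mn ≤ level ∧ level ≤ mx then [("name", n), ("emoji", e), ("color", c)]
      else pvFindLeagueA rest level

def get_user_league (level : Int) : List (String × String) :=
  pvFindLeagueA pvLeaguesA level

-- ===== PORT B =====
def pvBounds : List Int := [4, 9, 19, 34, 49, 64, 75]

def pvDataB : List (String × String × String) :=
  [ ("Искатели Искры", "🔥", "#a58c6f"),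
    ("Подмастерья Промптов", "🧱", "#bb7e5d"),
    ("Архитекторы Разума", "⚙️", "#6b7b8c"),
    ("Владыки Моделей", "🧠", "#a9a9a9"),
    ("Создатели Сознаний", "🔥", "#f4c542"),
    ("Легенды ИИ", "💎", "#4ecdc4"),
    ("Сингулярности", "🌀", "#9c27b0") ]

-- Source B's hand-written bisect_left while-loop; the fuel argument (hi - lo, which the
-- gap never exceeds and which shrinks each iteration) only makes the recursion structural
def pvBisectGo (xs : List Int) (x : Int) : Nat → Nat → Nat → Nat
  | 0, lo, _ => lo
  | fuel + 1, lo, hi =>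
    if lo < hi then
      let mid := (lo + hi) / 2
      if xs.getD mid 0 < x then pvBisectGo xs x fuel (mid + 1) hi
      else pvBisectGo xs x fuel lo mid
    else lo

def pvBisectLeft (xs : List Int) (x : Int) (lo hi : Nat) : Nat :=
  pvBisectGo xs x (hi - lo) lo hi

def get_user_league_alt (level : Int) : List (String × String) :=
  let i := pvBisectLeft pvBounds level 0 pvBounds.length
  if level < 1 ∨ pvBounds.length ≤ i then
    [("league_name", "Неизвестная Лига"), ("emoji", "❓"), ("color", "#cccccc")]
  else
    match pvDataB.getD i ("", "", "") with
    | (n, e, c) => [("name", n), ("emoji", e), ("color", c)]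

-- ===== PRECONDITION & SPEC =====
def Spec_get_user_league (level : Int) (out : List (String × String)) : Prop := out = get_user_league_alt level
instance (level : Int) (out : List (String × String)) : Decidable (Spec_get_user_league level out) := by unfold Spec_get_user_league; infer_instance

-- ===== CLAIM (what is proved, stated in full; the proofs are below) =====
def Claim_equal_get_user_league : Prop := ∀ (level : Int), Dom_get_user_league level → Spec_get_user_league level (get_user_league level)

-- ===== LEMMAS AND PROOFS =====

-- closed evaluation of the bisect_left loop on the concrete bounds
set_option maxHeartbeats 1600000 in
theorem pvBisEval (x : Int) : pvBisectLeft [4,9,19,34,49,64,75] x 0 7 =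
    if x ≤ 4 then 0 else if x ≤ 9 then 1 else if x ≤ 19 then 2 else if x ≤ 34 then 3
    else if x ≤ 49 then 4 else if x ≤ 64 then 5 else if x ≤ 75 then 6 else 7 := by
  simp [pvBisectLeft, pvBisectGo]
  split_ifs <;> omega

-- ===== VERDICT (by name: the statement is the Claim_ definition above) =====
set_option maxHeartbeats 1600000 in
theorem get_user_league_spec : Claim_equal_get_user_league := by
  intro x _
  unfold Spec_get_user_league get_user_league get_user_league_alt
  simp only [pvFindLeagueA, pvLeaguesA, pvDataB, pvBounds, List.length_cons, List.length_nil, Nat.reduceAdd,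
    pvBisEval]
  split_ifs <;> first | rfl | omega
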